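-- pv_equiv track=rewrite | github.com/Surstr0mming/Mathcrupto_Martyniuk | AES-128.py | mul_by_09
-- ===== SOURCE A (Python) =====
-- slov = { '0':'0000', '1':'0001', '2':'0010', '3':'0011', '4':'0100', '5':'0101', '6':'0110', '7':'0111', '8':'1000',
--         '9':'1001', 'a':'1010', 'b':'1011', 'c':'1100', 'd':'1101', 'e':'1110', 'f':'1111'}
--
-- slov1 = { '0000':'0', '0001':'1', '0010':'2', '0011':'3', '0100':'4', '0101':'5', '0110':'6', '0111':'7', '1000':'8',
--         '1001':'9', '1010':'a', '1011':'b', '1100':'c', '1101':'d', '1110':'e', '1111':'f', }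
--
-- def mul_by_02(num):
--     res = slov.get(num[0]) + slov.get(num[1])
--
--     if (res[0] == '0'):
--         z_02 = res[1:8] + '0'
--     else:
--         res = res[1:8] + '0'
--         one_b = '00011011'
--         z_02 = ''
--         for i in range(len(one_b)):
--             if int(res[i]) + int(one_b[i]) == 2:
--                 z_02 += '0'
--             elif int(res[i]) + int(one_b[i]) == 1:
--                 z_02 += '1'
--             else:
--                 z_02 += '0'
--
--
--     return z_02
--
-- def mul_by_09(num):
--     res1 = slov.get(num[0]) + slov.get(num[1])
--     num = slov1.get(mul_by_02(num)[:4]) + slov1.get(mul_by_02(num)[4:])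
--     num = slov1.get(mul_by_02(num)[:4]) + slov1.get(mul_by_02(num)[4:])
--     num = mul_by_02(num)
--
--     z_02 = ''
--     for i in range(len(num)):
--         if int(num[i]) + int(res1[i]) == 2:
--             z_02 += '0'
--         elif int(num[i]) + int(res1[i]) == 1:
--             z_02 += '1'
--         else:
--             z_02 += '0'
--
--     return z_02
-- ===== SOURCE B (Python) =====
-- slov = { '0':'0000', '1':'0001', '2':'0010', '3':'0011', '4':'0100', '5':'0101', '6':'0110', '7':'0111', '8':'1000',
--         '9':'1001', 'a':'1010', 'b':'1011', 'c':'1100', 'd':'1101', 'e':'1110', 'f':'1111'}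
--
-- def mul_by_09(num):
--     res1 = slov.get(num[0]) + slov.get(num[1])
--     x = int(res1, 2)
--     b = x
--     for _ in range(3):
--         b <<= 1
--         if b & 0x100:
--             b ^= 0x11b
--     return format(b ^ x, '08b')
-- ===== Notes on version B (the rewrite author's own statement) =====
-- stated objective: simpler
-- what changed: B parses the byte like A (slov lookups on num[0], num[1]) but then computes the product with three integer xtime steps (shift, conditional xor with 0x11b) and one final xor, formatting the result as an 8-bit binary string, instead of A's hex/binary dict round-trips and per-character binary-string XOR loops.
import Mathlib
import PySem

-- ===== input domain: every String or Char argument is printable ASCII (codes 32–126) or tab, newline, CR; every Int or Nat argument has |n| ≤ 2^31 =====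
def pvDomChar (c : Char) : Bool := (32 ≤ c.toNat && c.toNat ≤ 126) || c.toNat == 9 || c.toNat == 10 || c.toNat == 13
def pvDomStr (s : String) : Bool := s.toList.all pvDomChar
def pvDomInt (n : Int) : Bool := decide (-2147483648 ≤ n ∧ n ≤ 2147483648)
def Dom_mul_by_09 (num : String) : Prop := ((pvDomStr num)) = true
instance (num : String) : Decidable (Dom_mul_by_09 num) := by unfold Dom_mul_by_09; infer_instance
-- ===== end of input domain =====

-- B replaces A's binary-string/hex-dict round-trips with plain integer xtime arithmetic (objective: simpler).
-- Python strings are represented as List Char inside the ports; only the top-level argument/result are String.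

-- ===== PORT A =====
-- module constant: hex digit -> 4-bit binary string
def slov : PySem.Dict Char (List Char) := PySem.Dict.ofList
  [('0',['0','0','0','0']),('1',['0','0','0','1']),('2',['0','0','1','0']),('3',['0','0','1','1']),
   ('4',['0','1','0','0']),('5',['0','1','0','1']),('6',['0','1','1','0']),('7',['0','1','1','1']),
   ('8',['1','0','0','0']),('9',['1','0','0','1']),('a',['1','0','1','0']),('b',['1','0','1','1']),
   ('c',['1','1','0','0']),('d',['1','1','0','1']),('e',['1','1','1','0']),('f',['1','1','1','1'])]

def slov1 : PySem.Dict (List Char) Char := PySem.Dict.ofList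
  [(['0','0','0','0'],'0'),(['0','0','0','1'],'1'),(['0','0','1','0'],'2'),(['0','0','1','1'],'3'),
   (['0','1','0','0'],'4'),(['0','1','0','1'],'5'),(['0','1','1','0'],'6'),(['0','1','1','1'],'7'),
   (['1','0','0','0'],'8'),(['1','0','0','1'],'9'),(['1','0','1','0'],'a'),(['1','0','1','1'],'b'),
   (['1','1','0','0'],'c'),(['1','1','0','1'],'d'),(['1','1','1','0'],'e'),(['1','1','1','1'],'f')]

-- int(c) for the single chars '0'/'1' A feeds it under Pre_ (exact there)
def bitVal (c : Char) : Int := if c = '1' then 1 else 0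

def mul_by_02C (num : List Char) : List Char :=
  -- res = slov.get(num[0]) + slov.get(num[1])  (a None here raises TypeError in Python: outside Pre_)
  let res : List Char :=
    ((PySem.List.pyGet? num 0).bind (fun c => slov.get? c)).getD [] ++
    ((PySem.List.pyGet? num 1).bind (fun c => slov.get? c)).getD []
  if PySem.List.pyGet? res 0 = some '0' then
    PySem.List.slice res (some 1) (some 8) ++ ['0']
  else
    let res2 := PySem.List.slice res (some 1) (some 8) ++ ['0']
    let one_b : List Char := ['0','0','0','1','1','0','1','1']
    (PySem.List.pyRange 0 ((one_b.length : Int)) 1).foldl (fun (z : List Char) i =>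
      let s := bitVal ((PySem.List.pyGet? res2 i).getD '0') + bitVal ((PySem.List.pyGet? one_b i).getD '0')
      if s = 2 then z ++ ['0'] else if s = 1 then z ++ ['1'] else z ++ ['0']) []

def mul_by_09 (num : String) : String :=
  let cs := num.toList
  let res1 : List Char :=
    ((PySem.List.pyGet? cs 0).bind (fun c => slov.get? c)).getD [] ++
    ((PySem.List.pyGet? cs 1).bind (fun c => slov.get? c)).getD []
  -- num = slov1.get(mul_by_02(num)[:4]) + slov1.get(mul_by_02(num)[4:])   (twice; '?' stands for the None that raises outside Pre_)
  let num1 : List Char :=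
    [ (slov1.get? (PySem.List.slice (mul_by_02C cs) none (some 4))).getD '?'
    , (slov1.get? (PySem.List.slice (mul_by_02C cs) (some 4) none)).getD '?' ]
  let num2 : List Char :=
    [ (slov1.get? (PySem.List.slice (mul_by_02C num1) none (some 4))).getD '?'
    , (slov1.get? (PySem.List.slice (mul_by_02C num1) (some 4) none)).getD '?' ]
  let num3 : List Char := mul_by_02C num2
  String.ofList ((PySem.List.pyRange 0 ((num3.length : Int)) 1).foldl (fun (z : List Char) i =>
    let s := bitVal ((PySem.List.pyGet? num3 i).getD '0') + bitVal ((PySem.List.pyGet? res1 i).getD '0')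
    if s = 2 then z ++ ['0'] else if s = 1 then z ++ ['1'] else z ++ ['0']) [])

-- ===== PORT B =====
def mul_by_09_alt (num : String) : String :=
  -- res1 = slov.get(num[0]) + slov.get(num[1])  (same parse as A; None raises outside Pre_)
  let cs := num.toList
  let res1 : List Char :=
    ((PySem.List.pyGet? cs 0).bind (fun c => slov.get? c)).getD [] ++
    ((PySem.List.pyGet? cs 1).bind (fun c => slov.get? c)).getD []
  -- x = int(res1, 2): hand-ported binary parse; exact, res1 holds only '0'/'1' chars.
  -- All ints in Source B are nonnegative, so Nat arithmetic is exact.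
  let x : Nat := res1.foldl (fun a c => 2 * a + (if c = '1' then 1 else 0)) 0
  -- for _ in range(3): b <<= 1; if b & 0x100: b ^= 0x11b
  let b : Nat := (List.range 3).foldl (fun b _ =>
      let b' := b <<< 1
      if b' &&& 0x100 ≠ 0 then b' ^^^ 0x11b else b') x
  let r := b ^^^ x
  -- format(r, '08b') with r < 256: the 8 bits from the top
  String.ofList ((List.range 8).map (fun i => if (r >>> (7 - i)) &&& 1 = 1 then '1' else '0'))

-- ===== PRECONDITION & SPEC =====
def hexChars : List Char := ['0','1','2','3','4','5','6','7','8','9','a','b','c','d','e','f']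

-- A raises unless num has at least two characters and num[0], num[1] are lowercase hex digits
-- (otherwise IndexError, or slov.get returns None and the '+' raises TypeError).
def Pre_mul_by_09 (num : String) : Prop :=
  PySem.List.pyGet? num.toList 0 ∈ hexChars.map some ∧ PySem.List.pyGet? num.toList 1 ∈ hexChars.map some
instance (num : String) : Decidable (Pre_mul_by_09 num) := by unfold Pre_mul_by_09; infer_instance

def pvWitness_mul_by_09 : String := "1a"

def Spec_mul_by_09 (num : String) (out : String) : Prop := out = mul_by_09_alt num
instance (num : String) (out : String) : Decidable (Spec_mul_by_09 num out) := by unfold Spec_mul_by_09; infer_instance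

-- ===== CLAIM (what is proved, stated in full; the proofs are below) =====
def Claim_equal_mul_by_09 : Prop := ∀ (num : String), Dom_mul_by_09 num → Pre_mul_by_09 num → Spec_mul_by_09 num (mul_by_09 num)

-- ===== LEMMAS AND PROOFS =====
theorem listGet1 (c0 c1 : Char) (r : List Char) :
    PySem.List.pyGet? (c0::c1::r) 1 = some c1 := by
  simp [PySem.List.pyGet?, PySem.List.pyIdx?]

theorem mul02_drop (c0 c1 : Char) (r : List Char) :
    mul_by_02C (c0::c1::r) = mul_by_02C [c0, c1] := by
  simp only [mul_by_02C, PySem.List.pyGet?_zero_cons, listGet1]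

theorem mul09_drop (c0 c1 : Char) (r : List Char) :
    mul_by_09 (String.ofList (c0::c1::r)) = mul_by_09 (String.ofList [c0, c1]) := by
  simp only [mul_by_09, String.toList_ofList, PySem.List.pyGet?_zero_cons, listGet1, mul02_drop]

theorem alt_drop (c0 c1 : Char) (r : List Char) :
    mul_by_09_alt (String.ofList (c0::c1::r)) = mul_by_09_alt (String.ofList [c0, c1]) := by
  simp only [mul_by_09_alt, String.toList_ofList, PySem.List.pyGet?_zero_cons, listGet1]

set_option maxRecDepth 8000 in
theorem two_char :
    ∀ c0 ∈ hexChars, ∀ c1 ∈ hexChars,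
      mul_by_09 (String.ofList [c0, c1]) = mul_by_09_alt (String.ofList [c0, c1]) := by
  intro c0 h0 c1 h1
  fin_cases h0 <;> fin_cases h1 <;> decide

-- ===== VERDICT (by name: the statement is the Claim_ definition above) =====
theorem mul_by_09_spec : Claim_equal_mul_by_09 := by
  intro num _ hpre
  obtain ⟨h0, h1⟩ := hpre
  have hnum : num = String.ofList num.toList := by simp
  unfold Spec_mul_by_09
  rw [hnum]
  rcases hl : num.toList with _ | ⟨a, _ | ⟨b, r⟩⟩
  · rw [hl] at h1
    simp [PySem.List.pyGet?, PySem.List.pyIdx?] at h1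
  · rw [hl] at h1
    simp [PySem.List.pyGet?, PySem.List.pyIdx?] at h1
  · rw [hl] at h0 h1
    rw [PySem.List.pyGet?_zero_cons] at h0
    rw [listGet1] at h1
    have ha : a ∈ hexChars := by simpa using h0
    have hb : b ∈ hexChars := by simpa using h1
    rw [mul09_drop, alt_drop]
    exact two_char a ha b hb
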